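-- pv_equiv track=rewrite | github.com/cmbenello/141-discussion | problems/expressions.py | cl54_letters_then_digits
-- ===== SOURCE A (Python) =====
-- def cl54_letters_then_digits(s: str) -> bool:
--     """Midterm-style
--     Problem: Return True iff s matches the pattern of one-or-more letters followed by one-or-more digits,
--     and contains nothing else (no symbols). Do NOT use regex.
--     Inputs: s (str)
--     Output: bool.
--     """
--     if not s:
--         return False
--     i = 0
--     # at least one letter
--     if not s[i].isalpha():
--         return False
--     while i < len(s) and s[i].isalpha():
--         i += 1
--     if i == 0 or i == len(s):
--         return False
--     # at least one digit
--     j = i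
--     while j < len(s) and s[j].isdigit():
--         j += 1
--     return j == len(s)
-- ===== SOURCE B (Python) =====
-- def cl54_letters_then_digits(s: str) -> bool:
--     # Deterministic finite automaton for the pattern letter+ digit+.
--     # States: 0 = start, 1 = reading letters, 2 = reading digits, 3 = reject (absorbing).
--     state = 0
--     for ch in s:
--         if ch.isalpha():
--             state = 1 if state <= 1 else 3
--         elif ch.isdigit():
--             state = 2 if state in (1, 2) else 3
--         else:
--             state = 3
--     return state == 2
-- ===== Notes on version B (the rewrite author's own statement) =====
-- stated objective: alternative
-- what changed: A walks two explicit index phases (a letter while-loop, then a digit while-loop) with boundary checks; B runs a 4-state deterministic finite automaton as a single fold over the characters and accepts iff the final state is the digit state.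
import Mathlib
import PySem

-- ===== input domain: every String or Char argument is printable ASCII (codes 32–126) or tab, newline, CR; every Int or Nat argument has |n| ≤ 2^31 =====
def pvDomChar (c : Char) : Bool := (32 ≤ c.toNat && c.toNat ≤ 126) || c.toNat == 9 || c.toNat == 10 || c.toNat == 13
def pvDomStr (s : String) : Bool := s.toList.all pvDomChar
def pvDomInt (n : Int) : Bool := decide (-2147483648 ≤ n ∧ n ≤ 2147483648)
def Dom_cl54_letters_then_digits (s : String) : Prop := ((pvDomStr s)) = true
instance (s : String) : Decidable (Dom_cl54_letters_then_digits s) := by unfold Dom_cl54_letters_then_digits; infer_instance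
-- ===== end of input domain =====

-- B replaces A's two phase-walking while loops by a 4-state finite automaton run as a single
-- fold over the characters, accepting iff the final state is the digit state (alternative form).

-- ===== PORT A =====
-- `while i < len(s) and s[i].isalpha(): i += 1`
def pvWhileAlpha (cs : List Char) (i : Nat) : Nat :=
  if h : i < cs.length then
    if PySem.Chars.isalpha cs[i] then pvWhileAlpha cs (i + 1) else i
  else i
termination_by cs.length - i

-- `while j < len(s) and s[j].isdigit(): j += 1`
def pvWhileDigit (cs : List Char) (j : Nat) : Nat :=
  if h : j < cs.length then
    if PySem.Chars.isdigit cs[j] then pvWhileDigit cs (j + 1) else j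
  else j
termination_by cs.length - j

def cl54_letters_then_digits (s : String) : Bool :=
  match s.toList with
  | [] => false                               -- if not s: return False
  | c0 :: _ =>
    let cs := s.toList
    if !(PySem.Chars.isalpha c0) then false   -- if not s[0].isalpha(): return False  (i = 0)
    else
      let i := pvWhileAlpha cs 0
      if i == 0 || i == cs.length then false  -- if i == 0 or i == len(s): return False
      else
        let j := pvWhileDigit cs i
        j == cs.length                        -- return j == len(s)

-- ===== PORT B =====
-- the automaton transition: states 0 start, 1 letters, 2 digits, 3 reject
def pvStep (st : Nat) (c : Char) : Nat :=
  if PySem.Chars.isalpha c then (if st ≤ 1 then 1 else 3)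
  else if PySem.Chars.isdigit c then (if st = 1 ∨ st = 2 then 2 else 3)
  else 3

def cl54_letters_then_digits_alt (s : String) : Bool :=
  (s.toList.foldl pvStep 0) == 2

-- ===== PRECONDITION & SPEC =====
def Spec_cl54_letters_then_digits (s : String) (out : Bool) : Prop := out = cl54_letters_then_digits_alt s
instance (s : String) (out : Bool) : Decidable (Spec_cl54_letters_then_digits s out) := by unfold Spec_cl54_letters_then_digits; infer_instance

-- ===== CLAIM (what is proved, stated in full; the proofs are below) =====
def Claim_equal_cl54_letters_then_digits : Prop := ∀ (s : String), Dom_cl54_letters_then_digits s → Spec_cl54_letters_then_digits s (cl54_letters_then_digits s)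

-- ===== LEMMAS AND PROOFS =====

-- both sides reduce to this characterisation: k leading letters, 0 < k < len, digit tail
def pvSpecList (cs : List Char) : Bool :=
  let k := (cs.takeWhile PySem.Chars.isalpha).length
  decide (0 < k) && decide (k < cs.length) && (cs.drop k).all PySem.Chars.isdigit

theorem pv_digit_not_alpha (c : Char) (h : PySem.Chars.isdigit c = true) :
    PySem.Chars.isalpha c = false := by
  revert h
  simp only [PySem.Chars.isdigit, PySem.Chars.isalpha, PySem.Chars.isupper, PySem.Chars.islower,
    Bool.and_eq_true, Bool.or_eq_false_iff, Bool.and_eq_false_iff, decide_eq_true_eq,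
    decide_eq_false_iff_not, Char.le_def, UInt32.le_iff_toNat_le,
    show '0'.val.toNat = 48 from rfl, show '9'.val.toNat = 57 from rfl,
    show 'A'.val.toNat = 65 from rfl, show 'Z'.val.toNat = 90 from rfl,
    show 'a'.val.toNat = 97 from rfl, show 'z'.val.toNat = 122 from rfl]
  intro h
  omega

theorem pv_drop_takeWhile (p : Char → Bool) (l : List Char) :
    l.drop (l.takeWhile p).length = l.dropWhile p := by
  induction l with
  | nil => rfl
  | cons c t ih =>
    by_cases h : p c = true
    · simp [h, ih]
    · simp [(show p c = false by simpa using h)]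

theorem pvWhileAlpha_spec (suf : List Char) : ∀ (pre : List Char),
    pvWhileAlpha (pre ++ suf) pre.length
      = pre.length + (suf.takeWhile PySem.Chars.isalpha).length := by
  induction suf with
  | nil =>
    intro pre
    rw [pvWhileAlpha]
    simp
  | cons c rest ih =>
    intro pre
    rw [pvWhileAlpha]
    have hlt : pre.length < (pre ++ c :: rest).length := by simp
    have hget : (pre ++ c :: rest)[pre.length]'hlt = c := by
      simp [List.getElem_append_right]
    rw [dif_pos hlt, hget]
    by_cases hc : PySem.Chars.isalpha c = true
    · rw [if_pos hc]
      have := ih (pre ++ [c])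
      simp only [List.append_assoc, List.cons_append, List.nil_append, List.length_append,
        List.length_cons, List.length_nil] at this ⊢
      rw [this]
      simp [hc]
      omega
    · rw [if_neg hc]
      simp [(show PySem.Chars.isalpha c = false by simpa using hc)]

theorem pvWhileDigit_spec (suf : List Char) : ∀ (pre : List Char),
    pvWhileDigit (pre ++ suf) pre.length
      = pre.length + (suf.takeWhile PySem.Chars.isdigit).length := by
  induction suf with
  | nil =>
    intro pre
    rw [pvWhileDigit]
    simp
  | cons c rest ih =>
    intro pre
    rw [pvWhileDigit]
    have hlt : pre.length < (pre ++ c :: rest).length := by simp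
    have hget : (pre ++ c :: rest)[pre.length]'hlt = c := by
      simp [List.getElem_append_right]
    rw [dif_pos hlt, hget]
    by_cases hc : PySem.Chars.isdigit c = true
    · rw [if_pos hc]
      have := ih (pre ++ [c])
      simp only [List.append_assoc, List.cons_append, List.nil_append, List.length_append,
        List.length_cons, List.length_nil] at this ⊢
      rw [this]
      simp [hc]
      omega
    · rw [if_neg hc]
      simp [(show PySem.Chars.isdigit c = false by simpa using hc)]

theorem pvA_eq_spec (s : String) : cl54_letters_then_digits s = pvSpecList s.toList := by
  unfold cl54_letters_then_digits
  cases hcs : s.toList with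
  | nil => rfl
  | cons c0 tl =>
    show (if (!PySem.Chars.isalpha c0) = true then false
      else if (pvWhileAlpha (c0 :: tl) 0 == 0
          || pvWhileAlpha (c0 :: tl) 0 == (c0 :: tl).length) = true then false
      else (pvWhileDigit (c0 :: tl) (pvWhileAlpha (c0 :: tl) 0) == (c0 :: tl).length))
      = pvSpecList (c0 :: tl)
    by_cases ha : PySem.Chars.isalpha c0 = true
    · rw [ha]
      rw [if_neg (by simp)]
      have hA := pvWhileAlpha_spec s.toList []
      simp only [List.nil_append, List.length_nil, Nat.zero_add] at hA
      rw [hcs] at hA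
      set cs := c0 :: tl with hcseq
      set k := (cs.takeWhile PySem.Chars.isalpha).length with hk
      have hk0 : 0 < k := by
        rw [hk, hcseq, List.takeWhile_cons, ha]; simp
      have hkle : k ≤ cs.length := by
        rw [hk]; exact (List.takeWhile_prefix _).length_le
      rw [hA]
      have hD := pvWhileDigit_spec (cs.dropWhile PySem.Chars.isalpha)
        (cs.takeWhile PySem.Chars.isalpha)
      rw [List.takeWhile_append_dropWhile, ← hk, ← pv_drop_takeWhile PySem.Chars.isalpha cs,
        ← hk] at hD
      by_cases hcond : (k == 0 || k == cs.length) = true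
      · rw [if_pos hcond]
        have hkl : k = cs.length := by
          simp only [Bool.or_eq_true, beq_iff_eq] at hcond
          omega
        simp [pvSpecList, ← hk, hkl]
      · rw [if_neg hcond]
        have hlt : k < cs.length := by
          simp only [Bool.or_eq_true, beq_iff_eq] at hcond
          omega
        rw [hD, Bool.eq_iff_iff]
        simp only [beq_iff_eq, pvSpecList, ← hk, Bool.and_eq_true, decide_eq_true_eq]
        constructor
        · intro h
          have hlen : ((cs.drop k).takeWhile PySem.Chars.isdigit).length
              = (cs.drop k).length := by
            have := List.length_drop (l := cs) (i := k)
            omega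
          have heq := (List.takeWhile_prefix (p := PySem.Chars.isdigit)
            (l := cs.drop k)).eq_of_length hlen
          exact ⟨⟨hk0, hlt⟩, by
            simpa [List.all_eq_true] using List.takeWhile_eq_self_iff.mp heq⟩
        · rintro ⟨⟨-, -⟩, hall⟩
          have heq : (cs.drop k).takeWhile PySem.Chars.isdigit = cs.drop k :=
            List.takeWhile_eq_self_iff.mpr (by simpa [List.all_eq_true] using hall)
          rw [heq, List.length_drop]
          omega
    · have ha' : PySem.Chars.isalpha c0 = false := by simpa using ha
      rw [ha']
      simp [pvSpecList, ha']

-- the reject state is absorbing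
theorem pv_fold3 (cs : List Char) : cs.foldl pvStep 3 = 3 := by
  induction cs with
  | nil => rfl
  | cons c rest ih =>
    have : pvStep 3 c = 3 := by
      unfold pvStep; split_ifs <;> simp_all
    simpa [List.foldl_cons, this] using ih

-- from the digit state, the run accepts iff every remaining character is a digit
theorem pv_fold2 (cs : List Char) :
    (cs.foldl pvStep 2 == 2) = cs.all PySem.Chars.isdigit := by
  induction cs with
  | nil => rfl
  | cons c rest ih =>
    by_cases hd : PySem.Chars.isdigit c = true
    · have ha := pv_digit_not_alpha c hd
      have : pvStep 2 c = 2 := by unfold pvStep; simp [ha, hd]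
      simp [List.foldl_cons, this, ih, hd]
    · have hd' : PySem.Chars.isdigit c = false := by simpa using hd
      have : pvStep 2 c = 3 := by
        unfold pvStep; split_ifs <;> simp_all
      simp [List.foldl_cons, this, pv_fold3, hd']
-- (from state 1, alpha c gives state 1 again, so reject only via non-alpha non-digit)

-- from the letter state, the run accepts iff after the letters comes a nonempty all-digit tail
theorem pv_fold1 (cs : List Char) :
    (cs.foldl pvStep 1 == 2)
      = (!(cs.dropWhile PySem.Chars.isalpha).isEmpty
          && (cs.dropWhile PySem.Chars.isalpha).all PySem.Chars.isdigit) := by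
  induction cs with
  | nil => rfl
  | cons c rest ih =>
    by_cases ha : PySem.Chars.isalpha c = true
    · have : pvStep 1 c = 1 := by unfold pvStep; simp [ha]
      simp [List.foldl_cons, this, ih, ha]
    · have ha' : PySem.Chars.isalpha c = false := by simpa using ha
      by_cases hd : PySem.Chars.isdigit c = true
      · have : pvStep 1 c = 2 := by unfold pvStep; simp [ha', hd]
        simp [List.foldl_cons, this, pv_fold2, ha', hd]
      · have hd' : PySem.Chars.isdigit c = false := by simpa using hd
        have : pvStep 1 c = 3 := by unfold pvStep; simp [ha', hd']
        simp [List.foldl_cons, this, pv_fold3, ha', hd']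

theorem pvB_eq_spec (s : String) : cl54_letters_then_digits_alt s = pvSpecList s.toList := by
  unfold cl54_letters_then_digits_alt
  cases hcs : s.toList with
  | nil => rfl
  | cons c0 tl =>
    by_cases ha : PySem.Chars.isalpha c0 = true
    · have hstep : pvStep 0 c0 = 1 := by unfold pvStep; simp [ha]
      have htw : (c0 :: tl).takeWhile PySem.Chars.isalpha
          = c0 :: tl.takeWhile PySem.Chars.isalpha := by
        simp [ha]
      rw [List.foldl_cons, hstep, pv_fold1, Bool.eq_iff_iff]
      simp only [pvSpecList, htw, List.length_cons, List.drop_succ_cons, Bool.and_eq_true,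
        decide_eq_true_eq, Bool.not_eq_eq_eq_not, Bool.not_true, List.isEmpty_eq_false_iff,
        ← pv_drop_takeWhile PySem.Chars.isalpha tl]
      have hlen : (tl.takeWhile PySem.Chars.isalpha).length ≤ tl.length :=
        (List.takeWhile_prefix _).length_le
      constructor
      · rintro ⟨hne, hall⟩
        refine ⟨⟨by omega, ?_⟩, hall⟩
        have : tl.drop (tl.takeWhile PySem.Chars.isalpha).length ≠ [] := hne
        rw [← List.length_pos_iff, List.length_drop] at this
        omega
      · rintro ⟨⟨-, hlt⟩, hall⟩
        refine ⟨?_, hall⟩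
        rw [← List.length_pos_iff, List.length_drop]
        omega
    · have ha' : PySem.Chars.isalpha c0 = false := by simpa using ha
      have hstep : pvStep 0 c0 = 3 := by
        unfold pvStep; split_ifs <;> simp_all
      rw [List.foldl_cons, hstep, pv_fold3]
      simp [pvSpecList, ha']

-- ===== VERDICT (by name: the statement is the Claim_ definition above) =====
theorem cl54_letters_then_digits_spec : Claim_equal_cl54_letters_then_digits := by
  intro s _
  unfold Spec_cl54_letters_then_digits
  rw [pvA_eq_spec, pvB_eq_spec]
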